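-- pv_equiv track=rewrite | github.com/isRodgef/Questions_AC | section_d/D_hard2_froggon.py | froogon_representation
-- ===== SOURCE A (Python) =====
-- def froogon_representation(n):
--     factorial_list = [1]
--     i = 2
--     while factorial_list[0] <= n:
--         factorial_list.insert(0,factorial_list[0] * i)
--         i += 1
--
--     representation = []
--     temp_n = n
--     for factorial in factorial_list:
--         count = temp_n   // factorial
--         if n >= factorial:
--             representation.insert(0,str(count))
--         temp_n %= factorial
--
--     return " ".join(representation)
-- ===== SOURCE B (Python) =====
-- def froogon_representation(n):
--     digits = []
--     temp = n
--     k = 2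
--     while temp > 0:
--         digits.append(str(temp % k))
--         temp //= k
--         k += 1
--     return " ".join(digits)
-- ===== Notes on version B (the rewrite author's own statement) =====
-- stated objective: simpler
-- what changed: Replaces the precomputed descending factorial list plus a second quotient/remainder pass with a single mod-and-divide loop over increasing bases that emits the factoradic digits directly.
import Mathlib
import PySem

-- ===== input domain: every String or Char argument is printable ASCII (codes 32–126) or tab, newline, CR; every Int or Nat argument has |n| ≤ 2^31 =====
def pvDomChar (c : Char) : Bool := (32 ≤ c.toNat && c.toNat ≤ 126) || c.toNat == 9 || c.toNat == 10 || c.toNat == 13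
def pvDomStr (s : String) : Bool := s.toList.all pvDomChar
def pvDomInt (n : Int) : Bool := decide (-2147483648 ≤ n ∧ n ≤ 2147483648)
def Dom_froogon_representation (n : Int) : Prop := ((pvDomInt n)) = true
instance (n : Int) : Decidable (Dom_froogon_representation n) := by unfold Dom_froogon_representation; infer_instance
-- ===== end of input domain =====

-- B replaces A's precomputed descending factorial list and second quotient pass by one
-- mod-and-divide loop over increasing bases emitting the factoradic digits directly.

-- ===== PORT A =====
-- the while loop growing factorial_list at the front; state: head `front`, tail `rest`, counter i.
-- The conjuncts 1 ≤ front ∧ 2 ≤ i are totality guards only (always true on the reachable states).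
def pvBuildFacts (n front i : Int) (rest : List Int) : List Int :=
  if h : front ≤ n ∧ 1 ≤ front ∧ 2 ≤ i then
    pvBuildFacts n (front * i) (i + 1) (front :: rest)
  else front :: rest
termination_by (n + 1 - front).toNat
decreasing_by
  obtain ⟨h1, h2, h3⟩ := h
  have : front * 2 ≤ front * i := by
    apply mul_le_mul_of_nonneg_left h3 (by omega)
  omega

-- the for loop over factorial_list: count, conditional insert(0, str(count)), temp_n %= factorial
def pvLoopA (n : Int) : List Int → Int → List String → List String
  | [], _, rep => rep
  | f :: rest, temp, rep =>
      let count := PySem.Int.floordiv temp f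
      pvLoopA n rest (PySem.Int.mod temp f)
        (if f ≤ n then PySem.Int.toStr count :: rep else rep)

def froogon_representation (n : Int) : String :=
  PySem.Str.join " " (pvLoopA n (pvBuildFacts n 1 2 []) n [])

-- ===== PORT B =====
-- while temp > 0: append str(temp % k); temp //= k; k += 1   (2 ≤ k is a totality guard only)
def pvLoopB (temp k : Int) (digits : List String) : List String :=
  if h : 0 < temp ∧ 2 ≤ k then
    pvLoopB (PySem.Int.floordiv temp k) (k + 1)
      (digits ++ [PySem.Int.toStr (PySem.Int.mod temp k)])
  else digits
termination_by temp.toNat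
decreasing_by
  obtain ⟨h1, h2⟩ := h
  rw [PySem.Int.floordiv_eq_ediv_of_pos (show (0:Int) < k by omega)]
  have h0 : 0 ≤ temp / k := Int.ediv_nonneg (by omega) (by omega)
  have h4 : 0 ≤ temp % k := Int.emod_nonneg temp (by omega)
  have h5 : k * (temp / k) + temp % k = temp := Int.mul_ediv_add_emod temp k
  have h6 : 2 * (temp / k) ≤ k * (temp / k) := mul_le_mul_of_nonneg_right h2 h0
  have h7 : 2 * (temp / k) ≤ temp := by linarith
  omega

def froogon_representation_alt (n : Int) : String :=
  PySem.Str.join " " (pvLoopB n 2 [])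

-- ===== PRECONDITION & SPEC =====
def Spec_froogon_representation (n : Int) (out : String) : Prop := out = froogon_representation_alt n
instance (n : Int) (out : String) : Decidable (Spec_froogon_representation n out) := by unfold Spec_froogon_representation; infer_instance

-- ===== CLAIM (what is proved, stated in full; the proofs are below) =====
def Claim_equal_froogon_representation : Prop := ∀ (n : Int), Dom_froogon_representation n → Spec_froogon_representation n (froogon_representation n)

-- ===== LEMMAS AND PROOFS =====

def pvFact (m : Nat) : Int := (Nat.factorial m : Int)

def pvAsc (j c : Nat) : List Int := (List.range c).map (fun t => pvFact (j + t))

-- digits A collects (relative to rep), for the descending list [fact m, …, fact 1]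
def pvRevDigs (t : Int) : Nat → List String
  | 0 => []
  | m + 1 =>
      pvRevDigs (PySem.Int.mod t (pvFact (m + 1))) m
        ++ [PySem.Int.toStr (PySem.Int.floordiv t (pvFact (m + 1)))]

-- c digits in bases k, k+1, …, least significant first (B's shape)
def pvPad (t k : Int) : Nat → List String
  | 0 => []
  | c + 1 => PySem.Int.toStr (PySem.Int.mod t k) :: pvPad (PySem.Int.floordiv t k) (k + 1) c

def pvProd (k : Int) : Nat → Int
  | 0 => 1
  | c + 1 => k * pvProd (k + 1) c

lemma pvFact_pos (m : Nat) : 0 < pvFact m := by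
  simp [pvFact]; exact Nat.factorial_pos m

lemma pvFact_le (a b : Nat) (h : a ≤ b) : pvFact a ≤ pvFact b := by
  simp [pvFact]; exact_mod_cast Nat.factorial_le h

lemma pvFact_succ (m : Nat) : pvFact (m + 1) = pvFact m * ((m : Int) + 1) := by
  simp [pvFact, Nat.factorial_succ]; ring

lemma pvProd_pos (c : Nat) : ∀ k : Int, 1 ≤ k → 0 < pvProd k c := by
  induction c with
  | zero => intro k _; simp [pvProd]
  | succ c ih => intro k hk; simp only [pvProd]; have := ih (k + 1) (by omega); positivity

lemma pvProd_two (m : Nat) : pvProd 2 m = pvFact (m + 1) := by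
  have key : ∀ c j : Nat, pvFact (j + 1) * pvProd ((j : Int) + 2) c = pvFact (j + c + 1) := by
    intro c
    induction c with
    | zero => intro j; simp [pvProd]
    | succ c ih =>
      intro j
      simp only [pvProd]
      have e1 : ((j : Int) + 2) + 1 = (((j + 1 : Nat) : Int)) + 2 := by push_cast; ring
      rw [e1]
      have e2 : pvFact (j + 1) * ((j : Int) + 2) = pvFact (j + 2) := by
        rw [pvFact_succ (j + 1)]; push_cast; ring
      calc pvFact (j + 1) * (((j : Int) + 2) * pvProd ((((j + 1 : Nat) : Int)) + 2) c)
          = (pvFact (j + 1) * ((j : Int) + 2)) * pvProd ((((j + 1 : Nat) : Int)) + 2) c := by ring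
        _ = pvFact (j + 2) * pvProd ((((j + 1 : Nat) : Int)) + 2) c := by rw [e2]
        _ = pvFact (j + 1 + c + 1) := ih (j + 1)
        _ = pvFact (j + (c + 1) + 1) := by congr 1; omega
  have h0 := key m 0
  have h1 : pvFact 1 = 1 := by simp [pvFact, Nat.factorial]
  have h2 : ((0 : Nat) : Int) + 2 = 2 := by norm_num
  rw [h1, h2, one_mul] at h0
  simpa using h0

lemma pvAsc_cons (j c : Nat) : pvAsc j (c + 1) = pvFact j :: pvAsc (j + 1) c := by
  simp only [pvAsc, List.range_succ_eq_map, List.map_cons, List.map_map]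
  refine congrArg₂ _ (by norm_num) (List.map_congr_left ?_)
  intro t _
  show pvFact (j + (t + 1)) = pvFact (j + 1 + t)
  congr 1
  omega

lemma pvAsc_snoc (j c : Nat) : pvAsc j (c + 1) = pvAsc j c ++ [pvFact (j + c)] := by
  simp [pvAsc, List.range_succ]

-- A's build loop produces fact (j+c+1) :: [fact (j+c), …, fact j] ++ rest
lemma pvBuild_eq (n : Int) : ∀ c j : Nat, 1 ≤ j → pvFact (j + c) ≤ n → n < pvFact (j + c + 1) →
    ∀ rest, pvBuildFacts n (pvFact j) ((j : Int) + 1) rest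
      = pvFact (j + c + 1) :: ((pvAsc j (c + 1)).reverse ++ rest) := by
  intro c
  induction c with
  | zero =>
    intro j hj hle hlt rest
    rw [pvBuildFacts]
    have hg : pvFact j ≤ n ∧ 1 ≤ pvFact j ∧ 2 ≤ (j : Int) + 1 := by
      refine ⟨by simpa using hle, pvFact_pos j, by omega⟩
    rw [dif_pos hg, pvBuildFacts]
    have hstep : pvFact j * ((j : Int) + 1) = pvFact (j + 1) := (pvFact_succ j).symm
    rw [hstep]
    have hng : ¬ (pvFact (j + 1) ≤ n ∧ 1 ≤ pvFact (j + 1) ∧ 2 ≤ (j : Int) + 1 + 1) := by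
      intro ⟨h1, _, _⟩; simp at hlt; omega
    rw [dif_neg hng]
    simp [pvAsc]
  | succ c ih =>
    intro j hj hle hlt rest
    rw [pvBuildFacts]
    have hg : pvFact j ≤ n ∧ 1 ≤ pvFact j ∧ 2 ≤ (j : Int) + 1 := by
      refine ⟨le_trans (pvFact_le j (j + (c+1)) (by omega)) hle, pvFact_pos j, by omega⟩
    rw [dif_pos hg]
    have hstep : pvFact j * ((j : Int) + 1) = pvFact (j + 1) := (pvFact_succ j).symm
    have hcast : ((j : Int) + 1) + 1 = (((j + 1 : Nat) : Int)) + 1 := by push_cast; ring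
    rw [hstep, hcast, ih (j + 1) (by omega) (by
        have : j + 1 + c = j + (c + 1) := by omega
        rw [this]; exact hle)
      (by have : j + 1 + c + 1 = j + (c + 1) + 1 := by omega
          rw [this]; exact hlt)]
    rw [pvAsc_cons j (c + 1)]
    have : j + 1 + c + 1 = j + (c + 1) + 1 := by omega
    rw [this]
    simp

-- skipping n%f = n, f > n step + all-record regime
lemma pvLoopA_desc (n : Int) : ∀ m : Nat, pvFact m ≤ n →
    ∀ t rep, pvLoopA n ((pvAsc 1 m).reverse) t rep = pvRevDigs t m ++ rep := by
  intro m
  induction m with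
  | zero => intro _ t rep; simp [pvAsc, pvLoopA, pvRevDigs]
  | succ m ih =>
    intro hle t rep
    rw [pvAsc_snoc]
    simp only [List.reverse_append, List.reverse_cons, List.reverse_nil, List.nil_append,
      List.singleton_append]
    have h1m : pvFact (1 + m) = pvFact (m + 1) := by congr 1; omega
    rw [h1m]
    simp only [pvLoopA]
    rw [if_pos hle]
    rw [ih (le_trans (pvFact_le m (m + 1) (by omega)) hle)]
    simp [pvRevDigs]

lemma pvPadStep : ∀ c : Nat, ∀ k t : Int, 0 ≤ t → 2 ≤ k → t < pvProd k (c + 1) →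
    pvPad t k (c + 1)
      = pvPad (PySem.Int.mod t (pvProd k c)) k c
        ++ [PySem.Int.toStr (PySem.Int.floordiv t (pvProd k c))] := by
  intro c
  induction c with
  | zero =>
    intro k t ht hk hlt
    simp only [pvProd, pvPad, List.nil_append]
    rw [PySem.Int.mod_eq_emod_of_pos (by omega), PySem.Int.floordiv_eq_ediv_of_pos (show (0:Int) < 1 by omega),
      Int.emod_eq_of_lt ht (by simpa [pvProd] using hlt), Int.ediv_one]
  | succ c ih =>
    intro k t ht hk hlt
    have hP : 0 < pvProd (k + 1) c := pvProd_pos c (k + 1) (by omega)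
    have hP1' : 0 < pvProd k (c + 1) := pvProd_pos (c + 1) k (by omega)
    have hprod : pvProd k (c + 1) = k * pvProd (k + 1) c := rfl
    have hprod2 : pvProd k (c + 2) = k * pvProd (k + 1) (c + 1) := rfl
    have hdivlt : PySem.Int.floordiv t k < pvProd (k + 1) (c + 1) := by
      rw [PySem.Int.floordiv_eq_ediv_of_pos (show (0:Int) < k by omega)]
      rw [Int.ediv_lt_iff_lt_mul (by omega)]
      rw [hprod2] at hlt; linarith [mul_comm k (pvProd (k + 1) (c + 1))]
    have hdiv0 : 0 ≤ PySem.Int.floordiv t k := by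
      rw [PySem.Int.floordiv_eq_ediv_of_pos (show (0:Int) < k by omega)]
      exact Int.ediv_nonneg ht (by omega)
    have lhs1 : pvPad t k (c + 1 + 1)
        = PySem.Int.toStr (PySem.Int.mod t k) :: pvPad (PySem.Int.floordiv t k) (k + 1) (c + 1) := rfl
    have rhs1 : pvPad (PySem.Int.mod t (pvProd k (c + 1))) k (c + 1)
        = PySem.Int.toStr (PySem.Int.mod (PySem.Int.mod t (pvProd k (c + 1))) k)
          :: pvPad (PySem.Int.floordiv (PySem.Int.mod t (pvProd k (c + 1))) k) (k + 1) c := rfl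
    rw [lhs1, ih (k + 1) (PySem.Int.floordiv t k) hdiv0 (by omega) hdivlt, rhs1]
    have ha : PySem.Int.mod (PySem.Int.mod t (pvProd k (c + 1))) k = PySem.Int.mod t k := by
      rw [PySem.Int.mod_eq_emod_of_pos hP1', PySem.Int.mod_eq_emod_of_pos (show (0:Int) < k by omega),
        PySem.Int.mod_eq_emod_of_pos (show (0:Int) < k by omega), hprod]
      exact Int.emod_emod_of_dvd t ⟨pvProd (k + 1) c, rfl⟩
    have hb : PySem.Int.floordiv (PySem.Int.mod t (pvProd k (c + 1))) k
        = PySem.Int.mod (PySem.Int.floordiv t k) (pvProd (k + 1) c) := by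
      rw [PySem.Int.mod_eq_emod_of_pos hP1', PySem.Int.floordiv_eq_ediv_of_pos (show (0:Int) < k by omega),
        PySem.Int.floordiv_eq_ediv_of_pos (show (0:Int) < k by omega), PySem.Int.mod_eq_emod_of_pos hP, hprod]
      obtain ⟨a, rfl⟩ := Int.eq_ofNat_of_zero_le ht
      obtain ⟨b, hbk⟩ := Int.eq_ofNat_of_zero_le (show (0:Int) ≤ k by omega)
      obtain ⟨p, hpP⟩ := Int.eq_ofNat_of_zero_le hP.le
      subst hbk
      rw [hpP]
      have h2 : ((a % (b * p) / b : Nat) : Int) = ((a / b % p : Nat) : Int) :=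
        congrArg _ (Nat.mod_mul_right_div_self a b p)
      push_cast at h2
      exact h2
    have hc : PySem.Int.floordiv (PySem.Int.floordiv t k) (pvProd (k + 1) c)
        = PySem.Int.floordiv t (pvProd k (c + 1)) := by
      rw [PySem.Int.floordiv_eq_ediv_of_pos hP1', PySem.Int.floordiv_eq_ediv_of_pos (show (0:Int) < k by omega),
        PySem.Int.floordiv_eq_ediv_of_pos hP, hprod, Int.ediv_ediv_of_nonneg (by omega)]
    rw [ha, hb, hc]
    simp

lemma pvRevDigs_eq_pad : ∀ m : Nat, ∀ t : Int, 0 ≤ t → t < pvFact (m + 1) →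
    pvRevDigs t m = pvPad t 2 m := by
  intro m
  induction m with
  | zero => intro t _ _; rfl
  | succ m ih =>
    intro t ht hlt
    have hpos : 0 < pvFact (m + 1) := pvFact_pos (m + 1)
    have hm0 : 0 ≤ PySem.Int.mod t (pvFact (m + 1)) := PySem.Int.mod_nonneg _ hpos
    have hmlt : PySem.Int.mod t (pvFact (m + 1)) < pvFact (m + 1) := PySem.Int.mod_lt _ hpos
    simp only [pvRevDigs]
    rw [ih _ hm0 hmlt]
    rw [pvPadStep m 2 t ht (by omega) (by rw [pvProd_two]; exact hlt), pvProd_two]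

lemma pvLoopB_pad : ∀ m : Nat, ∀ k t : Int, 2 ≤ k → pvProd k m ≤ t → t < pvProd k (m + 1) →
    ∀ acc, pvLoopB t k acc = acc ++ pvPad t k (m + 1) := by
  intro m
  induction m with
  | zero =>
    intro k t hk hge hlt acc
    simp only [pvProd] at hge hlt
    rw [pvLoopB, dif_pos ⟨by omega, hk⟩]
    have hdiv : PySem.Int.floordiv t k = 0 := by
      rw [PySem.Int.floordiv_eq_ediv_of_pos (by omega)]
      exact Int.ediv_eq_zero_of_lt (by omega) (by simpa [pvProd] using hlt)
    rw [hdiv, pvLoopB, dif_neg (by omega)]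
    simp [pvPad]
  | succ m ih =>
    intro k t hk hge hlt acc
    have hP : 0 < pvProd (k + 1) m := pvProd_pos m (k + 1) (by omega)
    have hprod : pvProd k (m + 1) = k * pvProd (k + 1) m := rfl
    have hprod2 : pvProd k (m + 2) = k * pvProd (k + 1) (m + 1) := rfl
    have ht : 0 < t := by rw [hprod] at hge; nlinarith
    rw [pvLoopB, dif_pos ⟨ht, hk⟩]
    have hdge : pvProd (k + 1) m ≤ PySem.Int.floordiv t k := by
      rw [PySem.Int.floordiv_eq_ediv_of_pos (by omega), Int.le_ediv_iff_mul_le (by omega)]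
      rw [hprod] at hge; linarith [mul_comm (pvProd (k + 1) m) k]
    have hdlt : PySem.Int.floordiv t k < pvProd (k + 1) (m + 1) := by
      rw [PySem.Int.floordiv_eq_ediv_of_pos (by omega), Int.ediv_lt_iff_lt_mul (by omega)]
      rw [hprod2] at hlt; linarith [mul_comm (pvProd (k + 1) (m + 1)) k]
    rw [ih (k + 1) _ (by omega) hdge hdlt]
    simp [pvPad]

lemma pv_exists_band (n : Int) (hn : 1 ≤ n) : ∃ k : Nat, 1 ≤ k ∧ pvFact k ≤ n ∧ n < pvFact (k + 1) := by
  have hwit : n < pvFact (n.toNat + 1) := by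
    have h1 : (n.toNat + 1 : Nat) ≤ (n.toNat + 1).factorial := Nat.self_le_factorial _
    have : ((n.toNat + 1 : Nat) : Int) ≤ pvFact (n.toNat + 1) := by
      simpa [pvFact] using (Int.ofNat_le.mpr h1)
    omega
  classical
  let P : Nat → Prop := fun m => n < pvFact (m + 1)
  have hex : ∃ m, P m := ⟨n.toNat, hwit⟩
  let K := Nat.find hex
  have hK : P K := Nat.find_spec hex
  have hK1 : 1 ≤ K := by
    by_contra h
    have hK0 : K = 0 := by omega
    have := hK
    rw [hK0] at this
    simp [P, pvFact, Nat.factorial] at this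
    omega
  refine ⟨K, hK1, ?_, hK⟩
  have := Nat.find_min hex (m := K - 1) (by omega)
  simp only [P, not_lt] at this
  have hKe : K - 1 + 1 = K := by omega
  rwa [hKe] at this

-- ===== VERDICT (by name: the statement is the Claim_ definition above) =====
theorem froogon_representation_spec : Claim_equal_froogon_representation := by
  intro n _
  unfold Spec_froogon_representation froogon_representation froogon_representation_alt
  congr 1
  by_cases hn : 1 ≤ n
  · obtain ⟨k, hk1, hle, hlt⟩ := pv_exists_band n hn
    have hbuild := pvBuild_eq n (k - 1) 1 (le_refl 1)
      (by have : 1 + (k - 1) = k := by omega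
          rw [this]; exact hle)
      (by have : 1 + (k - 1) + 1 = k + 1 := by omega
          rw [this]; exact hlt) []
    have h2 : pvFact 1 = 1 := by simp [pvFact, Nat.factorial]
    rw [h2] at hbuild
    have hk1e : 1 + (k - 1) + 1 = k + 1 := by omega
    have hk2e : k - 1 + 1 = k := by omega
    rw [hk1e, hk2e] at hbuild
    have hbuild' : pvBuildFacts n 1 2 [] = pvFact (k + 1) :: (pvAsc 1 k).reverse := by
      simpa using hbuild
    rw [hbuild']
    -- first step of loopA skips the big factorial
    have hskip : pvLoopA n (pvFact (k + 1) :: (pvAsc 1 k).reverse) n []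
        = pvLoopA n ((pvAsc 1 k).reverse) n [] := by
      simp only [pvLoopA]
      rw [if_neg (by omega)]
      rw [PySem.Int.mod_eq_emod_of_pos (pvFact_pos (k + 1)), Int.emod_eq_of_lt (by omega) hlt]
    rw [hskip, pvLoopA_desc n k hle, pvRevDigs_eq_pad k n (by omega) hlt]
    have hb := pvLoopB_pad (k - 1) 2 n (le_refl 2)
      (by rw [pvProd_two, hk2e]; exact hle)
      (by rw [pvProd_two, hk2e]; exact hlt) []
    rw [hb]
    rw [hk2e]
    simp
  · -- n ≤ 0 : both digit lists are empty
    have hbuild : pvBuildFacts n 1 2 [] = [1] := by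
      rw [pvBuildFacts, dif_neg (by omega)]
    rw [hbuild]
    simp only [pvLoopA]
    rw [if_neg (by omega)]
    rw [pvLoopB, dif_neg (by omega)]
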